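-- pv_equiv track=rewrite | github.com/Aniket886/passtrenghchecker | backend.py | detect_keyboard_patterns
-- ===== SOURCE A (Python) =====
-- def detect_keyboard_patterns(password):
--     """Detect keyboard pattern sequences"""
--     keyboard_rows = ['qwertyuiop', 'asdfghjkl', 'zxcvbnm']
--     count = 0
--
--     for row in keyboard_rows:
--         for i in range(len(row) - 2):
--             pattern = row[i:i+3]
--             if pattern in password.lower():
--                 count += 1
--             if pattern[::-1] in password.lower():
--                 count += 1
--
--     return count
-- ===== SOURCE B (Python) =====
-- def detect_keyboard_patterns(password):
--     """Detect keyboard pattern sequences"""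
--     rows = ['qwertyuiop', 'asdfghjkl', 'zxcvbnm']
--     tris = {r[i:i + 3] for r in rows for i in range(len(r) - 2)}
--     low = password.lower()
--     fwd = set()
--     rev = set()
--     for i in range(len(low) - 2):
--         w = low[i:i + 3]
--         if w in tris:
--             fwd.add(w)
--         b = w[::-1]
--         if b in tris:
--             rev.add(b)
--     return len(fwd) + len(rev)
-- ===== Notes on version B (the rewrite author's own statement) =====
-- stated objective: alternative
-- what changed: B inverts the traversal: instead of testing each of the 24 keyboard patterns against the password with substring scans, it slides a length-3 window over the lowered password once, collecting into two sets the keyboard trigrams seen forward and the ones whose reverse was seen, and returns the sum of the two set sizes.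
import Mathlib
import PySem

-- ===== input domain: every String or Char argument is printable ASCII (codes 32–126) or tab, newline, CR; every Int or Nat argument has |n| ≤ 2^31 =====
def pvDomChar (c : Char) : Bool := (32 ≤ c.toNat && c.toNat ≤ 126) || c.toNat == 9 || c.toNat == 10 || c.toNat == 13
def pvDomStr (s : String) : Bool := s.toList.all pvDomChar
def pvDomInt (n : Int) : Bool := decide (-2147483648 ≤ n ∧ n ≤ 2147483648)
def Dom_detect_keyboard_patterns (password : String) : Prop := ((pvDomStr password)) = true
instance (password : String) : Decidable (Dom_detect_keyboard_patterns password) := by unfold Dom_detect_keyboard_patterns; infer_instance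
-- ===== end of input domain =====

-- B inverts the traversal: one sliding-window pass over the lowered password collects
-- the keyboard trigrams seen (forward / reversed) into two sets and returns the sum
-- of their sizes, instead of A's per-pattern substring scans.

-- ===== PORT A =====
def detect_keyboard_patterns (password : String) : Int :=
  let keyboard_rows : List String := ["qwertyuiop", "asdfghjkl", "zxcvbnm"]
  keyboard_rows.foldl (fun count row =>
    (PySem.List.pyRange 0 (PySem.Str.len row - 2) 1).foldl (fun count i =>
      let pattern := PySem.Str.slice row (some i) (some (i + 3))
      let count := if PySem.Str.isIn pattern (PySem.Str.lower password) then count + 1 else count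
      if PySem.Str.isIn ((PySem.Str.slice? pattern none none (-1)).getD "")
          (PySem.Str.lower password) then count + 1 else count) count) 0

-- ===== PORT B =====
-- the set comprehension {r[i:i+3] for r in rows for i in range(len(r)-2)}
def pvPats : List String :=
  (["qwertyuiop", "asdfghjkl", "zxcvbnm"] : List String).flatMap (fun r =>
    (PySem.List.pyRange 0 (PySem.Str.len r - 2) 1).map
      (fun i => PySem.Str.slice r (some i) (some (i + 3))))

def pvTris : PySem.Set String := PySem.Set.ofList pvPats

-- w[::-1]
def pvRev (w : String) : String := (PySem.Str.slice? w none none (-1)).getD ""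

def detect_keyboard_patterns_alt (password : String) : Int :=
  let low := PySem.Str.lower password
  let st := (PySem.List.pyRange 0 (PySem.Str.len low - 2) 1).foldl
    (fun (st : PySem.Set String × PySem.Set String) i =>
      let w := PySem.Str.slice low (some i) (some (i + 3))
      let fwd := if PySem.Set.contains pvTris w then PySem.Set.add st.1 w else st.1
      let b := pvRev w
      let rev := if PySem.Set.contains pvTris b then PySem.Set.add st.2 b else st.2
      (fwd, rev)) (PySem.Set.empty, PySem.Set.empty)
  (st.1.length : Int) + (st.2.length : Int)

-- ===== PRECONDITION & SPEC =====
def Spec_detect_keyboard_patterns (password : String) (out : Int) : Prop := out = detect_keyboard_patterns_alt password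
instance (password : String) (out : Int) : Decidable (Spec_detect_keyboard_patterns password out) := by unfold Spec_detect_keyboard_patterns; infer_instance

-- ===== CLAIM (what is proved, stated in full; the proofs are below) =====
def Claim_equal_detect_keyboard_patterns : Prop := ∀ (password : String), Dom_detect_keyboard_patterns password → Spec_detect_keyboard_patterns password (detect_keyboard_patterns password)

-- ===== LEMMAS AND PROOFS =====

-- the 3-grams of low, window by window, in order
def pvWindows (low : String) : List String :=
  (PySem.List.pyRange 0 (PySem.Str.len low - 2) 1).map
    (fun i => PySem.Str.slice low (some i) (some (i + 3)))

theorem pv_rev_toList (s : String) : (pvRev s).toList = s.toList.reverse := by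
  unfold pvRev
  rw [PySem.Str.slice?_none_none_neg_one]
  simp

theorem pv_rev_rev (s : String) : pvRev (pvRev s) = s := by
  apply String.toList_inj.mp
  rw [pv_rev_toList, pv_rev_toList, List.reverse_reverse]

theorem pv_rev_len (s : String) : (pvRev s).toList.length = s.toList.length := by
  rw [pv_rev_toList, List.length_reverse]

theorem pv_pats_nodup : pvPats.Nodup := by decide

theorem pv_pats_len : ∀ p ∈ pvPats, p.toList.length = 3 := by decide

-- a length-3 string is a substring of low iff it is one of low's windows
theorem pv_mem3 (low p : String) (hp : p.toList.length = 3) :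
    PySem.Str.isIn p low = true ↔ p ∈ pvWindows low := by
  rw [PySem.Str.isIn_eq, ← PySem.Chars.exists_prefix_drop_iff_isIn]
  unfold pvWindows
  rw [List.mem_map]
  have hL : low.toList.length = low.length := by simp
  constructor
  · rintro ⟨j, t, ht⟩
    have hlen : j + 3 ≤ low.length := by
      have := congrArg List.length ht
      simp [hp] at this
      omega
    refine ⟨(j : Int), ?_, ?_⟩
    · rw [PySem.List.mem_pyRange_one]
      refine ⟨by positivity, ?_⟩
      simp [PySem.Str.len]
      omega
    · apply String.toList_inj.mp
      rw [PySem.Str.toList_slice]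
      simp only [PySem.Chars.slice_eq_listSlice]
      have h3 : ((j : Int) + 3) = ((j + 3 : Nat) : Int) := by push_cast; ring
      rw [h3, PySem.List.slice_natCast]
      have h2 : j + 3 - j = 3 := by omega
      rw [h2, ← ht, List.take_left' hp]
  · rintro ⟨i, hi, hs⟩
    rw [PySem.List.mem_pyRange_one] at hi
    obtain ⟨h0, hlt⟩ := hi
    refine ⟨i.toNat, ?_⟩
    have : p.toList = (low.toList.drop i.toNat).take 3 := by
      rw [← hs, PySem.Str.toList_slice]
      simp only [PySem.Chars.slice_eq_listSlice]
      rw [PySem.List.slice_toNat _ h0 (by omega)]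
      congr 1
      omega
    rw [this]
    exact List.take_prefix _ _

-- every window of low has length 3
theorem pv_win_len (low : String) : ∀ w ∈ pvWindows low, w.toList.length = 3 := by
  intro w hw
  unfold pvWindows at hw
  rw [List.mem_map] at hw
  obtain ⟨i, hi, rfl⟩ := hw
  rw [PySem.List.mem_pyRange_one] at hi
  obtain ⟨h0, hlt⟩ := hi
  have hL : low.toList.length = low.length := by simp
  simp [PySem.Str.len] at hlt
  rw [PySem.Str.toList_slice]
  simp only [PySem.Chars.slice_eq_listSlice]
  rw [PySem.List.slice_toNat _ h0 (by omega)]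
  simp
  omega

-- A's nested fold is the sum, over all 24 patterns, of the two substring indicators
theorem pv_A_sum (password : String) :
    detect_keyboard_patterns password =
      (pvPats.map (fun p =>
        (if PySem.Str.isIn p (PySem.Str.lower password) then (1 : Int) else 0)
        + (if PySem.Str.isIn (pvRev p) (PySem.Str.lower password) then (1 : Int) else 0))).sum := by
  unfold detect_keyboard_patterns pvPats pvRev
  have hfun : ∀ (row : String),
      (fun (count i : Int) =>
        let pattern := PySem.Str.slice row (some i) (some (i + 3))
        let count := if PySem.Str.isIn pattern (PySem.Str.lower password) then count + 1 else count
        if PySem.Str.isIn ((PySem.Str.slice? pattern none none (-1)).getD "")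
            (PySem.Str.lower password) then count + 1 else count)
      = (fun count i => count +
          ((if PySem.Str.isIn (PySem.Str.slice row (some i) (some (i + 3))) (PySem.Str.lower password) then (1 : Int) else 0)
          + (if PySem.Str.isIn ((PySem.Str.slice? (PySem.Str.slice row (some i) (some (i + 3))) none none (-1)).getD "")
                (PySem.Str.lower password) then (1 : Int) else 0))) := by
    intro row; funext c i
    simp only []
    split_ifs <;> ring
  simp only [hfun, PySem.List.foldl_add, List.foldl_cons, List.foldl_nil, List.flatMap_cons,
    List.flatMap_nil, List.map_append, List.map_map, List.sum_append, List.append_nil,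
    Function.comp_def]
  ring

-- B's sliding-window fold, characterised: the two sets it builds
theorem pv_B_char (low : String) :
    (PySem.List.pyRange 0 (PySem.Str.len low - 2) 1).foldl
      (fun (st : PySem.Set String × PySem.Set String) i =>
        let w := PySem.Str.slice low (some i) (some (i + 3))
        let fwd := if PySem.Set.contains pvTris w then PySem.Set.add st.1 w else st.1
        let b := pvRev w
        let rev := if PySem.Set.contains pvTris b then PySem.Set.add st.2 b else st.2
        (fwd, rev)) (PySem.Set.empty, PySem.Set.empty)
    = (PySem.Set.ofList ((pvWindows low).filter (fun w => PySem.Set.contains pvTris w)),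
       PySem.Set.ofList (((pvWindows low).filter
         (fun w => PySem.Set.contains pvTris (pvRev w))).map pvRev)) := by
  have h1 : (PySem.List.pyRange 0 (PySem.Str.len low - 2) 1).foldl
      (fun (st : PySem.Set String × PySem.Set String) i =>
        let w := PySem.Str.slice low (some i) (some (i + 3))
        let fwd := if PySem.Set.contains pvTris w then PySem.Set.add st.1 w else st.1
        let b := pvRev w
        let rev := if PySem.Set.contains pvTris b then PySem.Set.add st.2 b else st.2
        (fwd, rev)) (PySem.Set.empty, PySem.Set.empty)
      = (pvWindows low).foldl
        (fun (st : PySem.Set String × PySem.Set String) w =>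
          (if PySem.Set.contains pvTris w then PySem.Set.add st.1 w else st.1,
           if PySem.Set.contains pvTris (pvRev w) then PySem.Set.add st.2 (pvRev w) else st.2))
        (PySem.Set.empty, PySem.Set.empty) := by
    unfold pvWindows
    rw [List.foldl_map]
  have hf : List.foldl (fun s w => if PySem.Set.contains pvTris w then PySem.Set.add s w else s)
      PySem.Set.empty (pvWindows low)
      = PySem.Set.ofList ((pvWindows low).filter (fun w => PySem.Set.contains pvTris w)) := by
    rw [PySem.List.foldl_if_eq_foldl_filter]
    show List.foldl PySem.Set.add [] _ = _
    rw [← PySem.Set.ofList_eq_foldl]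
  have hg : List.foldl (fun s w => if PySem.Set.contains pvTris (pvRev w) then PySem.Set.add s (pvRev w) else s)
      PySem.Set.empty (pvWindows low)
      = PySem.Set.ofList (((pvWindows low).filter
          (fun w => PySem.Set.contains pvTris (pvRev w))).map pvRev) := by
    rw [PySem.List.foldl_if_eq_foldl_filter (f := fun s w => PySem.Set.add s (pvRev w)),
      ← List.foldl_map]
    show List.foldl PySem.Set.add [] _ = _
    rw [← PySem.Set.ofList_eq_foldl]
  rw [h1, PySem.List.foldl_prod_mk
    (f := fun s w => if PySem.Set.contains pvTris w then PySem.Set.add s w else s)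
    (g := fun s w => if PySem.Set.contains pvTris (pvRev w) then PySem.Set.add s (pvRev w) else s),
    hf, hg]

-- the forward set holds exactly the patterns that occur in low
theorem pv_fwd_mem (low x : String) :
    x ∈ PySem.Set.ofList ((pvWindows low).filter (fun w => PySem.Set.contains pvTris w))
      ↔ x ∈ pvPats.filter (fun p => PySem.Str.isIn p low) := by
  rw [PySem.Set.mem_ofList, List.mem_filter, List.mem_filter]
  constructor
  · rintro ⟨hw, hc⟩
    have hx : x ∈ pvPats := (PySem.Set.mem_ofList _ _).mp ((PySem.Set.contains_iff _ _).mp hc)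
    exact ⟨hx, (pv_mem3 low x (pv_pats_len x hx)).mpr hw⟩
  · rintro ⟨hx, hin⟩
    exact ⟨(pv_mem3 low x (pv_pats_len x hx)).mp hin,
      (PySem.Set.contains_iff _ _).mpr ((PySem.Set.mem_ofList _ _).mpr hx)⟩

-- the reverse set holds exactly the patterns whose reverse occurs in low
theorem pv_rev_mem (low x : String) :
    x ∈ PySem.Set.ofList (((pvWindows low).filter
        (fun w => PySem.Set.contains pvTris (pvRev w))).map pvRev)
      ↔ x ∈ pvPats.filter (fun p => PySem.Str.isIn (pvRev p) low) := by
  rw [PySem.Set.mem_ofList, List.mem_map, List.mem_filter]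
  constructor
  · rintro ⟨w, hw, rfl⟩
    rw [List.mem_filter] at hw
    obtain ⟨hwin, hc⟩ := hw
    have hx : pvRev w ∈ pvPats := (PySem.Set.mem_ofList _ _).mp ((PySem.Set.contains_iff _ _).mp hc)
    refine ⟨hx, ?_⟩
    rw [pv_rev_rev]
    have hlen : w.toList.length = 3 := pv_win_len low w hwin
    exact (pv_mem3 low w hlen).mpr hwin
  · rintro ⟨hx, hin⟩
    refine ⟨pvRev x, ?_, pv_rev_rev x⟩
    rw [List.mem_filter]
    have hlen : (pvRev x).toList.length = 3 := by
      rw [pv_rev_len]; exact pv_pats_len x hx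
    refine ⟨(pv_mem3 low (pvRev x) hlen).mp hin, ?_⟩
    rw [pv_rev_rev]
    exact (PySem.Set.contains_iff _ _).mpr ((PySem.Set.mem_ofList _ _).mpr hx)

-- a 0/1 indicator sum over the patterns equals the size of the corresponding set
theorem pv_count_eq (q : String → Bool)
    (s : List String) (hnd : s.Nodup)
    (hmem : ∀ x, x ∈ s ↔ x ∈ pvPats.filter q) :
    (pvPats.map (fun p => if q p then (1 : Int) else 0)).sum = (s.length : Int) := by
  rw [PySem.List.sum_map_ite_one_zero, List.countP_eq_length_filter]
  have hperm : (pvPats.filter q).Perm s :=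
    (List.perm_ext_iff_of_nodup (pv_pats_nodup.filter q) hnd).mpr
      (fun a => ⟨fun h => (hmem a).mpr h, fun h => (hmem a).mp h⟩)
  exact_mod_cast hperm.length_eq

-- ===== VERDICT (by name: the statement is the Claim_ definition above) =====
theorem detect_keyboard_patterns_spec : Claim_equal_detect_keyboard_patterns := by
  intro password _
  unfold Spec_detect_keyboard_patterns
  rw [pv_A_sum]
  simp only [detect_keyboard_patterns_alt]
  rw [pv_B_char (PySem.Str.lower password)]
  dsimp only
  rw [List.sum_map_add]
  rw [pv_count_eq
        (fun p => PySem.Str.isIn p (PySem.Str.lower password)) _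
        (PySem.Set.nodup_ofList _)
        (fun x => pv_fwd_mem (PySem.Str.lower password) x),
      pv_count_eq
        (fun p => PySem.Str.isIn (pvRev p) (PySem.Str.lower password)) _
        (PySem.Set.nodup_ofList _)
        (fun x => pv_rev_mem (PySem.Str.lower password) x)]
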